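-- pv_equiv track=rewrite | github.com/JGarbacz99/SprawozdanieAISD | Sprawozdanie/AISD_Lab1b_1.3.py | sortowanie_leksykograficzne
-- ===== SOURCE A (Python) =====
-- def rozwinięcie_dziesiętne(liczba):
--     cyfry = []
--     while liczba > 0:
--         cyfra = liczba % 10
--         cyfry.insert(0, cyfra)
--         liczba //= 10
--     return cyfry
--
-- def sortowanie_leksykograficzne(liczby):
--     posortowane_liczby = []
--     for liczba in liczby:
--         wstawiono = False
--         for i, posortowana_liczba in enumerate(posortowane_liczby):
--             if rozwinięcie_dziesiętne(liczba) < rozwinięcie_dziesiętne(posortowana_liczba):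
--                 posortowane_liczby.insert(i, liczba)
--                 wstawiono = True
--                 break
--         if not wstawiono:
--             posortowane_liczby.append(liczba)
--     return posortowane_liczby
-- ===== SOURCE B (Python) =====
-- def sortowanie_leksykograficzne(liczby):
--     def klucz(liczba):
--         cyfry = []
--         while liczba > 0:
--             cyfry.append(liczba % 10)
--             liczba //= 10
--         cyfry.reverse()
--         return cyfry
--     return sorted(liczby, key=klucz)
-- ===== Notes on version B (the rewrite author's own statement) =====
-- stated objective: faster
-- what changed: Replaces the hand-written quadratic insertion sort (re-deriving both digit keys on every inner comparison) by a single stable sorted() call with the digit-list key computed once per element.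
import Mathlib
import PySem

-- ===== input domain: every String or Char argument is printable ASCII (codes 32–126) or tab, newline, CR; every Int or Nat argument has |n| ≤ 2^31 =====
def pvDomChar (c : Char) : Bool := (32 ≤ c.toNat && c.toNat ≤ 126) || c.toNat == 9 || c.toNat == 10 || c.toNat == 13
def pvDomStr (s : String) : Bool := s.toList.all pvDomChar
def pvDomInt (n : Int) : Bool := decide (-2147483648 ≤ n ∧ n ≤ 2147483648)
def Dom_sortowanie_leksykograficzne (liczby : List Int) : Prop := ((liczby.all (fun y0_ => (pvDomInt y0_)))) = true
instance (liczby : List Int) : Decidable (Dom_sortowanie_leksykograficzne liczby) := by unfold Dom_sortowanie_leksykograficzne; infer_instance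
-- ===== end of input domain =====

-- B replaces A's quadratic insertion sort by one stable sorted-with-key call (digit key computed once per element).

-- ===== PORT A =====
-- termination measure helper for the digit loops (cited by decreasing_by)
theorem pvFloordivTen_lt (n : Int) (h : n > 0) : (PySem.Int.floordiv n 10).toNat < n.toNat := by
  have he : PySem.Int.floordiv n 10 = n / 10 := by
    rw [show PySem.Int.floordiv n 10 = n.fdiv 10 from rfl,
      Int.fdiv_eq_ediv_of_nonneg n (by norm_num : (0:Int) ≤ 10)]
  rw [he]
  omega

-- while liczba > 0: cyfra = liczba % 10; cyfry.insert(0, cyfra); liczba //= 10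
def pvRozwLoop (liczba : Int) (cyfry : List Int) : List Int :=
  if h : liczba > 0 then
    pvRozwLoop (PySem.Int.floordiv liczba 10) (PySem.Int.mod liczba 10 :: cyfry)
  else cyfry
termination_by liczba.toNat
decreasing_by exact pvFloordivTen_lt liczba h

def rozwiniecie_dziesietne (liczba : Int) : List Int := pvRozwLoop liczba []

-- inner 'for i, posortowana_liczba in enumerate(...)' scan: insert before the first
-- element whose digit list is strictly greater, else append at the end
def pvWstaw (liczba : Int) : List Int → List Int
  | [] => [liczba]
  | y :: t =>
      if rozwiniecie_dziesietne liczba < rozwiniecie_dziesietne y then liczba :: y :: t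
      else y :: pvWstaw liczba t

def sortowanie_leksykograficzne (liczby : List Int) : List Int :=
  liczby.foldl (fun posortowane liczba => pvWstaw liczba posortowane) []

-- ===== PORT B =====
-- klucz: append digits least-significant first, then reverse
def pvKluczLoop (liczba : Int) (cyfry : List Int) : List Int :=
  if h : liczba > 0 then
    pvKluczLoop (PySem.Int.floordiv liczba 10) (cyfry ++ [PySem.Int.mod liczba 10])
  else cyfry
termination_by liczba.toNat
decreasing_by exact pvFloordivTen_lt liczba h

def pvKlucz (liczba : Int) : List Int := (pvKluczLoop liczba []).reverse

def sortowanie_leksykograficzne_alt (liczby : List Int) : List Int :=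
  PySem.List.sorted liczby pvKlucz false

-- ===== PRECONDITION & SPEC =====
def Spec_sortowanie_leksykograficzne (liczby : List Int) (out : List Int) : Prop := out = sortowanie_leksykograficzne_alt liczby
instance (liczby : List Int) (out : List Int) : Decidable (Spec_sortowanie_leksykograficzne liczby out) := by unfold Spec_sortowanie_leksykograficzne; infer_instance

-- ===== CLAIM (what is proved, stated in full; the proofs are below) =====
def Claim_equal_sortowanie_leksykograficzne : Prop := ∀ (liczby : List Int), Dom_sortowanie_leksykograficzne liczby → Spec_sortowanie_leksykograficzne liczby (sortowanie_leksykograficzne liczby)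

-- ===== LEMMAS AND PROOFS =====
theorem pvKluczLoop_reverse (liczba : Int) : ∀ (cyfry : List Int),
    (pvKluczLoop liczba cyfry).reverse = pvRozwLoop liczba cyfry.reverse := by
  induction liczba, ([] : List Int) using pvKluczLoop.induct with
  | case1 n cyfry0 h ih =>
      intro cyfry
      rw [pvKluczLoop, pvRozwLoop, dif_pos h, dif_pos h, ih]
      simp
  | case2 n cyfry0 h =>
      intro cyfry
      rw [pvKluczLoop, pvRozwLoop, dif_neg h, dif_neg h]

theorem pvKlucz_eq_rozw (liczba : Int) : pvKlucz liczba = rozwiniecie_dziesietne liczba := by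
  simpa using pvKluczLoop_reverse liczba []

theorem pvWstaw_eq_insertBy (liczba : Int) (ys : List Int) :
    pvWstaw liczba ys =
      PySem.List.insertBy (fun a b => decide (pvKlucz a < pvKlucz b)) liczba ys := by
  induction ys with
  | nil => simp [pvWstaw, PySem.List.insertBy]
  | cons y t ih =>
      simp only [pvWstaw, PySem.List.insertBy, pvKlucz_eq_rozw, ih, decide_eq_true_eq]

-- ===== VERDICT (by name: the statement is the Claim_ definition above) =====
theorem sortowanie_leksykograficzne_spec : Claim_equal_sortowanie_leksykograficzne := by
  intro liczby _
  unfold Spec_sortowanie_leksykograficzne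
  rw [sortowanie_leksykograficzne_alt, PySem.List.sorted_eq_foldl_insertBy,
    sortowanie_leksykograficzne]
  congr 1
  funext acc x
  exact pvWstaw_eq_insertBy x acc
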